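-- pv_equiv track=rewrite | github.com/dlgudwn55/baekjoon | 백준/Silver/1291. 이면수와 임현수/이면수와 임현수.py | check_imy
-- ===== SOURCE A (Python) =====
-- def check_imy(n):
--     if n == 4 or n >= 6:
--         s = sum([int(digit) for digit in str(n)])
--         if s % 2 == 1:
--             return True
--         else:
--             return False
--     return False
-- ===== SOURCE B (Python) =====
-- def check_imy(n):
--     if n == 4 or n >= 6:
--         total = 0
--         m = n
--         while m > 0:
--             total += m % 10
--             m //= 10
--         return total % 2 == 1
--     return False
-- ===== Notes on version B (the rewrite author's own statement) =====
-- stated objective: alternative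
-- what changed: The digit sum is computed arithmetically by repeated division and modulo on the integer itself instead of converting n to a string and parsing each character back to an int.
import Mathlib
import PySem

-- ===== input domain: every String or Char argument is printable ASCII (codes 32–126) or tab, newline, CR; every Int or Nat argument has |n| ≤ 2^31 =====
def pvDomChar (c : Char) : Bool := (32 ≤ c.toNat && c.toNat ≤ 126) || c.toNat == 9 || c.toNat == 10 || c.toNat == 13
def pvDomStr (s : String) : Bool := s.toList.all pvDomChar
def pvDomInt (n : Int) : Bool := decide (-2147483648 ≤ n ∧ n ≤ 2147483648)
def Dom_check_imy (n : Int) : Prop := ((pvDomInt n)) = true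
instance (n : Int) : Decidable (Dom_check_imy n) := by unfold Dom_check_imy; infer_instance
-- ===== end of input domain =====

-- B changes the digit-sum computation from string parsing to integer div/mod; same gate and parity test.

-- ===== PORT A =====
-- int(digit) on a single digit character of str(n) (always '0'..'9' inside the gate, where n ≥ 4): exact there.
def pyDigitVal (c : Char) : Int := (c.toNat : Int) - 48

def check_imy (n : Int) : Bool :=
  if n == 4 || n ≥ 6 then
    let s : Int := ((PySem.Int.toChars n).map pyDigitVal).sum
    if PySem.Int.mod s 2 == 1 then true else false
  else false

-- ===== PORT B =====
-- while m > 0: total += m % 10; m //= 10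
def digitLoop (m total : Int) : Int :=
  if _h : 0 < m then
    digitLoop (PySem.Int.floordiv m 10) (total + PySem.Int.mod m 10)
  else total
termination_by m.toNat
decreasing_by
  rw [PySem.Int.floordiv_eq_ediv_of_pos (by omega)]
  omega

def check_imy_alt (n : Int) : Bool :=
  if n == 4 || n ≥ 6 then
    PySem.Int.mod (digitLoop n 0) 2 == 1
  else false

-- ===== PRECONDITION & SPEC =====
def Spec_check_imy (n : Int) (out : Bool) : Prop := out = check_imy_alt n
instance (n : Int) (out : Bool) : Decidable (Spec_check_imy n out) := by unfold Spec_check_imy; infer_instance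

-- ===== CLAIM (what is proved, stated in full; the proofs are below) =====
def Claim_equal_check_imy : Prop := ∀ (n : Int), Dom_check_imy n → Spec_check_imy n (check_imy n)

-- ===== LEMMAS AND PROOFS =====

-- proof-side digit sum
def dsum (n : Nat) : Int :=
  if n = 0 then 0 else dsum (n / 10) + (n % 10 : Nat)
decreasing_by omega

lemma digitChar_val (k : Nat) (h : k < 10) : pyDigitVal (Nat.digitChar k) = (k : Int) := by
  interval_cases k <;> decide

lemma csum_toDigitsCore (f : Nat) : ∀ (n : Nat) (acc : List Char), n < f →
    ((Nat.toDigitsCore 10 f n acc).map pyDigitVal).sum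
      = dsum n + (acc.map pyDigitVal).sum := by
  induction f with
  | zero => intro n acc h; omega
  | succ f ih =>
    intro n acc h
    rw [Nat.toDigitsCore]
    by_cases h10 : n / 10 = 0
    · simp only [h10, if_true, List.map_cons, List.sum_cons,
        digitChar_val (n % 10) (Nat.mod_lt _ (by omega))]
      rw [dsum]
      by_cases hn : n = 0
      · subst hn; simp
      · simp only [hn, if_false, h10]
        rw [dsum]
        simp [Int.add_comm]
    · simp only [h10, if_false]
      rw [ih (n / 10) _ (by omega)]
      conv_rhs => rw [dsum]
      simp only [List.map_cons, List.sum_cons,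
        digitChar_val (n % 10) (Nat.mod_lt _ (by omega))]
      by_cases hn : n = 0
      · omega
      · simp only [hn, if_false]
        ring

lemma digitLoop_eq (m : Nat) : ∀ (t : Int), digitLoop (m : Int) t = t + dsum m := by
  induction m using Nat.strong_induction_on with
  | _ m ih =>
    intro t
    rw [digitLoop]
    by_cases hm : 0 < (m : Int)
    · have hm' : 0 < m := by exact_mod_cast hm
      simp only [hm, dif_pos]
      rw [PySem.Int.floordiv_eq_ediv_of_pos (by omega),
          PySem.Int.mod_eq_emod_of_pos (by omega)]
      have h1 : (m : Int) / 10 = ((m / 10 : Nat) : Int) := by omega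
      have h2 : (m : Int) % 10 = ((m % 10 : Nat) : Int) := by omega
      rw [h1, h2, ih (m / 10) (by omega)]
      conv_rhs => rw [dsum]
      simp only [show m ≠ 0 by omega, if_false]
      ring
    · have : m = 0 := by omega
      subst this
      simp only [hm, dif_neg, not_false_iff]
      rw [dsum]
      simp

lemma sum_eq (n : Int) (hn : 0 < n) :
    ((PySem.Int.toChars n).map pyDigitVal).sum = digitLoop n 0 := by
  have hn' : ¬ n < 0 := by omega
  rw [PySem.Int.toChars]
  simp only [hn', if_false]
  rw [Nat.toDigits, csum_toDigitsCore (n.toNat + 1) n.toNat [] (by omega)]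
  have : (n.toNat : Int) = n := Int.toNat_of_nonneg (by omega)
  rw [← this, digitLoop_eq]
  simp only [List.map_nil, List.sum_nil, add_zero, zero_add, Int.toNat_natCast]

-- ===== VERDICT (by name: the statement is the Claim_ definition above) =====
theorem check_imy_spec : Claim_equal_check_imy := by
  intro n _
  unfold Spec_check_imy check_imy check_imy_alt
  by_cases hg : (n == 4 || n ≥ 6) = true
  · simp only [hg, if_true]
    have hpos : 0 < n := by
      rcases Bool.or_eq_true_iff.mp hg with h | h
      · have := of_decide_eq_true h; omega
      · have := of_decide_eq_true h; omega
    rw [sum_eq n hpos]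
    split <;> simp_all
  · simp [hg]
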